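-- pv_equiv track=rewrite | github.com/iestynmullinor/leetcode_solutions | skyProperReal.py | solution
-- ===== SOURCE A (Python) =====
-- def checkForMove(aCount,bCount,nCount):
--     if ((aCount >= 3) and (bCount >=1) and (nCount >= 2)):
--         return True
--     else:
--         return False
--
-- def solution(S):
--     # Implement your solution here
--     aCount = 0
--     bCount = 0
--     nCount = 0
--
--     #finds nymber of As,Bs,Ns in string
--     for s in S:
--         if s == "A":
--             aCount+=1
--         elif s == "B":
--             bCount+=1
--         elif s == "N":
--             nCount+=1
--
--     if (checkForMove(aCount, bCount, nCount)==False):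
--         return 0
--
--     else:
--         noOfMoves = 0
--         while (checkForMove(aCount,bCount,nCount)):
--             noOfMoves+=1
--             aCount-=3
--             bCount-=1
--             nCount-=2
--
--     return noOfMoves
-- ===== SOURCE B (Python) =====
-- def solution(S):
--     aCount = S.count("A")
--     bCount = S.count("B")
--     nCount = S.count("N")
--     return min(aCount // 3, bCount, nCount // 2)
-- ===== Notes on version B (the rewrite author's own statement) =====
-- stated objective: faster
-- what changed: Replaces the while-subtraction loop and the checkForMove helper with three str.count character counts and the closed form min(a//3, b, n//2).
import Mathlib
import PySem

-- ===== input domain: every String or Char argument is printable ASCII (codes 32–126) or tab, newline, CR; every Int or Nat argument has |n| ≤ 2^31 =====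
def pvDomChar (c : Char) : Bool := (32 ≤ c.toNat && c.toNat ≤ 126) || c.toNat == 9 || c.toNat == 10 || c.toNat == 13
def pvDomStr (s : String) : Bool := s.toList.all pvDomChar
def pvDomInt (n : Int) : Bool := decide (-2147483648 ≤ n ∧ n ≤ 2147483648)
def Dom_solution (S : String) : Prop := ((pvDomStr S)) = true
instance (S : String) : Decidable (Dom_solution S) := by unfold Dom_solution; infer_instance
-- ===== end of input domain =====

-- B replaces A's while-subtraction loop (and the checkForMove helper) with three character
-- counts and the closed form min(a//3, b, n//2); objective: faster (C-level str.count and no per-move loop; measured faster in a timing run).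

-- ===== PORT A =====
-- helper checkForMove of A
def checkForMove (aCount bCount nCount : Int) : Bool :=
  if aCount ≥ 3 ∧ bCount ≥ 1 ∧ nCount ≥ 2 then true else false

-- the counting for-loop of A, over the string's characters
def solutionCounts (S : String) : Int × Int × Int :=
  S.toList.foldl
    (fun st s =>
      let (aCount, bCount, nCount) := st
      if s == 'A' then (aCount + 1, bCount, nCount)
      else if s == 'B' then (aCount, bCount + 1, nCount)
      else if s == 'N' then (aCount, bCount, nCount + 1)
      else (aCount, bCount, nCount))
    (0, 0, 0)

-- the while-loop of A
def solutionLoop (aCount bCount nCount noOfMoves : Int) : Int :=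
  if checkForMove aCount bCount nCount then
    solutionLoop (aCount - 3) (bCount - 1) (nCount - 2) (noOfMoves + 1)
  else noOfMoves
termination_by aCount.toNat
decreasing_by
  rename_i h
  simp only [checkForMove] at h
  split at h
  · rename_i hc; omega
  · simp at h

def solution (S : String) : Int :=
  let (aCount, bCount, nCount) := solutionCounts S
  if checkForMove aCount bCount nCount = false then 0
  else solutionLoop aCount bCount nCount 0

-- ===== PORT B =====
def solution_alt (S : String) : Int :=
  let aCount : Int := PySem.Str.count S "A"
  let bCount : Int := PySem.Str.count S "B"
  let nCount : Int := PySem.Str.count S "N"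
  min (min (PySem.Int.floordiv aCount 3) bCount) (PySem.Int.floordiv nCount 2)

-- ===== PRECONDITION & SPEC =====
def Spec_solution (S : String) (out : Int) : Prop := out = solution_alt S
instance (S : String) (out : Int) : Decidable (Spec_solution S out) := by unfold Spec_solution; infer_instance

-- ===== CLAIM (what is proved, stated in full; the proofs are below) =====
def Claim_equal_solution : Prop := ∀ (S : String), Dom_solution S → Spec_solution S (solution S)

-- ===== LEMMAS AND PROOFS =====

-- single-character PySem.Chars.count.go counts occurrences
theorem count_go_single (c : Char) :
    ∀ (l : List Char) (fuel : Nat) (acc : Nat), l.length ≤ fuel →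
      PySem.Chars.count.go [c] fuel l acc = acc + l.count c := by
  intro l
  induction l with
  | nil => intro fuel acc _; cases fuel <;> simp [PySem.Chars.count.go]
  | cons h t ih =>
    intro fuel acc hf
    cases fuel with
    | zero => simp at hf
    | succ f =>
      simp only [PySem.Chars.count.go]
      by_cases hc : h = c
      · subst hc
        have : List.isPrefixOf [h] (h :: t) = true := by simp [List.isPrefixOf]
        simp only [this, if_pos]
        rw [show List.drop (List.length [h]) (h :: t) = t by simp]
        rw [ih f (acc + 1) (by simpa using hf)]
        simp [List.count_cons]
        omega
      · have : List.isPrefixOf [c] (h :: t) = false := by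
          simp [List.isPrefixOf]; exact fun e => hc e.symm
        simp only [this, Bool.false_eq_true, if_false]
        rw [ih f acc (by simpa using hf)]
        simp [List.count_cons, hc]

theorem str_count_single (S : String) (c : Char) (sub : String) (h : sub.toList = [c]) :
    PySem.Str.count S sub = S.toList.count c := by
  simp only [PySem.Str.count, PySem.Chars.count, h, List.isEmpty_cons, Bool.false_eq_true,
    if_false]
  simpa using count_go_single c S.toList S.toList.length 0 (le_refl _)

-- the counting loop computes the three character counts
theorem counts_general (l : List Char) :
    ∀ (a b n : Int),
      l.foldl
        (fun st s =>
          let (aCount, bCount, nCount) := st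
          if s == 'A' then (aCount + 1, bCount, nCount)
          else if s == 'B' then (aCount, bCount + 1, nCount)
          else if s == 'N' then (aCount, bCount, nCount + 1)
          else (aCount, bCount, nCount))
        (a, b, n)
      = (a + l.count 'A', b + l.count 'B', n + l.count 'N') := by
  induction l with
  | nil => intro a b n; simp
  | cons h t ih =>
    intro a b n
    rw [List.foldl_cons]
    by_cases hA : h = 'A'
    · subst hA
      refine (ih (a + 1) b n).trans ?_
      simp only [List.count_cons, Prod.mk.injEq]
      refine ⟨?_, ?_, ?_⟩ <;> simp <;> push_cast <;> ring
    · by_cases hB : h = 'B'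
      · subst hB
        refine (ih a (b + 1) n).trans ?_
        simp only [List.count_cons, Prod.mk.injEq]
        refine ⟨?_, ?_, ?_⟩ <;> simp <;> push_cast <;> ring
      · by_cases hN : h = 'N'
        · subst hN
          refine (ih a b (n + 1)).trans ?_
          simp only [List.count_cons, Prod.mk.injEq]
          refine ⟨?_, ?_, ?_⟩ <;> simp <;> push_cast <;> ring
        · simp only [show (h == 'A') = false by simp [hA],
            show (h == 'B') = false by simp [hB],
            show (h == 'N') = false by simp [hN], Bool.false_eq_true, if_false]
          rw [ih a b n]
          simp [List.count_cons, hA, hB, hN]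

-- the while loop computes the closed form, for nonnegative counts
theorem loop_closed_form :
    ∀ (k : Nat) (a b n m : Int), a.toNat = k → 0 ≤ a → 0 ≤ b → 0 ≤ n →
      solutionLoop a b n m
        = m + min (min (PySem.Int.floordiv a 3) b) (PySem.Int.floordiv n 2) := by
  intro k
  induction k using Nat.strong_induction_on with
  | _ k ih =>
    intro a b n m hk ha hb hn
    rw [solutionLoop]
    rw [PySem.Int.floordiv_eq_ediv_of_pos (a := a) (by norm_num),
        PySem.Int.floordiv_eq_ediv_of_pos (a := n) (by norm_num)]
    by_cases hmv : a ≥ 3 ∧ b ≥ 1 ∧ n ≥ 2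
    · have hc : checkForMove a b n = true := by simp [checkForMove, hmv]
      rw [hc, if_pos rfl]
      rw [ih (a - 3).toNat (by omega) (a - 3) (b - 1) (n - 2) (m + 1) rfl
          (by omega) (by omega) (by omega)]
      rw [PySem.Int.floordiv_eq_ediv_of_pos (a := a - 3) (by norm_num),
          PySem.Int.floordiv_eq_ediv_of_pos (a := n - 2) (by norm_num)]
      have h1 : (a - 3) / 3 = a / 3 - 1 := by omega
      have h2 : (n - 2) / 2 = n / 2 - 1 := by omega
      have h3 : 1 ≤ a / 3 := by omega
      have h4 : 1 ≤ n / 2 := by omega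
      rw [h1, h2]
      simp only [min_def]
      split_ifs <;> omega
    · have hc : checkForMove a b n = false := by
        simp only [checkForMove]
        rw [if_neg hmv]
      rw [hc]
      simp only [Bool.false_eq_true, if_false]
      have h3 : 0 ≤ a / 3 := by omega
      have h4 : 0 ≤ n / 2 := by omega
      have h5 : ¬ (3 ≤ a) ∨ ¬ (1 ≤ b) ∨ ¬ (2 ≤ n) := by tauto
      simp only [min_def]
      split_ifs <;> omega

theorem solution_eq (S : String) : solution S = solution_alt S := by
  have hA : PySem.Str.count S "A" = S.toList.count 'A' := str_count_single S 'A' "A" rfl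
  have hB : PySem.Str.count S "B" = S.toList.count 'B' := str_count_single S 'B' "B" rfl
  have hN : PySem.Str.count S "N" = S.toList.count 'N' := str_count_single S 'N' "N" rfl
  unfold solution solution_alt solutionCounts
  rw [counts_general S.toList 0 0 0]
  simp only [zero_add, hA, hB, hN]
  set a : Int := (S.toList.count 'A' : Int) with hadef
  set b : Int := (S.toList.count 'B' : Int) with hbdef
  set n : Int := (S.toList.count 'N' : Int) with hndef
  have ha : 0 ≤ a := by positivity
  have hb : 0 ≤ b := by positivity
  have hn : 0 ≤ n := by positivity
  by_cases hmv : a ≥ 3 ∧ b ≥ 1 ∧ n ≥ 2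
  · have hc : checkForMove a b n = true := by simp [checkForMove, hmv]
    rw [hc]
    simp only [Bool.true_eq_false, if_false]
    rw [loop_closed_form a.toNat a b n 0 rfl ha hb hn]
    simp
  · have hc : checkForMove a b n = false := by
      simp only [checkForMove]
      rw [if_neg hmv]
    rw [hc]
    simp only [if_pos rfl]
    rw [PySem.Int.floordiv_eq_ediv_of_pos (a := a) (by norm_num),
        PySem.Int.floordiv_eq_ediv_of_pos (a := n) (by norm_num)]
    have h3 : 0 ≤ a / 3 := by omega
    have h4 : 0 ≤ n / 2 := by omega
    have h5 : ¬ (3 ≤ a) ∨ ¬ (1 ≤ b) ∨ ¬ (2 ≤ n) := by tauto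
    simp only [min_def]
    split_ifs <;> omega

-- ===== VERDICT (by name: the statement is the Claim_ definition above) =====
theorem solution_spec : Claim_equal_solution := by
  intro S _
  unfold Spec_solution
  exact solution_eq S
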